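-- pv_equiv track=rewrite | github.com/BenLeong0/leetcode_etc | random_problems/hannah_application.py | get_duplicate_locations
-- ===== SOURCE A (Python) =====
-- from typing import Callable, Dict, List, Set, Tuple
--
-- def get_duplicate_locations(directions: str) -> int:
--     """
--     Given input string of robot movement, return the number of locations visited more than once
--     """
--     filtered_directions: List[str] = [dir for dir in directions if dir in "NESW"]
--
--     current_pos: Tuple[int] = (0,0)
--     visited: Set[Tuple[int]] = {(0,0)}
--     visited_twice: Set[Tuple[int]] = set()
--
--     transformations: Dict[str, Callable[[Tuple[int]], Tuple[int]]] = {
--         "N": ( lambda pos: (pos[0], pos[1]+1) ),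
--         "E": ( lambda pos: (pos[0]+1, pos[1]) ),
--         "S": ( lambda pos: (pos[0], pos[1]-1) ),
--         "W": ( lambda pos: (pos[0]-1, pos[1]) ),
--     }
--
--     for dir in filtered_directions:
--         current_pos = transformations[dir](current_pos)
--         if current_pos in visited:
--             visited_twice.add(current_pos)
--         else:
--             visited.add(current_pos)
--
--     return len(visited_twice)
-- ===== SOURCE B (Python) =====
-- from collections import Counter
-- from typing import Dict, List, Tuple
--
-- def get_duplicate_locations(directions: str) -> int:
--     """
--     Given input string of robot movement, return the number of locations visited more than once
--     """
--     deltas: Dict[str, Tuple[int, int]] = {"N": (0, 1), "E": (1, 0), "S": (0, -1), "W": (-1, 0)}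
--     pos: Tuple[int, int] = (0, 0)
--     positions: List[Tuple[int, int]] = [pos]
--     for d in directions:
--         if d in "NESW":
--             dx, dy = deltas[d]
--             pos = (pos[0] + dx, pos[1] + dy)
--             positions.append(pos)
--     counts = Counter(positions)
--     return sum(1 for v in counts.values() if v >= 2)
-- ===== Notes on version B (the rewrite author's own statement) =====
-- stated objective: idiomatic
-- what changed: Replaces the incremental two-set/branch bookkeeping with building the full trajectory list (seeded with the origin) and then tallying it with collections.Counter, returning the number of positions whose frequency is at least 2.
import Mathlib
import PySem

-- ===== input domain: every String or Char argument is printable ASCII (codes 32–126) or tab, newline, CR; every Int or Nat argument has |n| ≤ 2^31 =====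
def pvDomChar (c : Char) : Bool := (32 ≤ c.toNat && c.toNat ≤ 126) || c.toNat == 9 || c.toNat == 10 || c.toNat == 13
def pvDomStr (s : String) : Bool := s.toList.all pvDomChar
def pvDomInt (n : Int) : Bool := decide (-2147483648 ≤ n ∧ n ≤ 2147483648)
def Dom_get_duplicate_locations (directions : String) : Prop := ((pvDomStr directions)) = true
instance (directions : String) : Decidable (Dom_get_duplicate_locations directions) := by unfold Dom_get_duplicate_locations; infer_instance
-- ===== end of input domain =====

-- B replaces A's incremental two-set/branch bookkeeping by building the full trajectory
-- list and tallying it with a Counter (idiomatic; same cost).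

-- ===== PORT A =====
-- A's dict 'transformations' of four lambdas; the lookup transformations[dir] (dir ∈ "NESW")
-- is ported as this branch on dir.
def pvTransformA (dir : Char) (pos : Int × Int) : Int × Int :=
  if dir = 'N' then (pos.1, pos.2 + 1)
  else if dir = 'E' then (pos.1 + 1, pos.2)
  else if dir = 'S' then (pos.1, pos.2 - 1)
  else (pos.1 - 1, pos.2)

-- one iteration of A's loop body over state (current_pos, visited, visited_twice)
def pvStepA (st : (Int × Int) × PySem.Set (Int × Int) × PySem.Set (Int × Int)) (dir : Char) :
    (Int × Int) × PySem.Set (Int × Int) × PySem.Set (Int × Int) :=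
  let current_pos := pvTransformA dir st.1
  if PySem.Set.contains st.2.1 current_pos then
    (current_pos, st.2.1, PySem.Set.add st.2.2 current_pos)
  else
    (current_pos, PySem.Set.add st.2.1 current_pos, st.2.2)

def get_duplicate_locations (directions : String) : Int :=
  -- 'dir in "NESW"' for a single character is membership among its characters
  let filtered_directions : List Char :=
    directions.toList.filter (fun dir => decide (dir ∈ (['N', 'E', 'S', 'W'] : List Char)))
  let st := filtered_directions.foldl pvStepA
    ((0, 0), PySem.Set.ofList [((0, 0) : Int × Int)], PySem.Set.empty)
  (PySem.Set.len st.2.2 : Int)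

-- ===== PORT B =====
-- B's dict 'deltas' of four coordinate pairs, ported as a branch on d
def pvDelta (d : Char) : Int × Int :=
  if d = 'N' then (0, 1)
  else if d = 'E' then (1, 0)
  else if d = 'S' then (0, -1)
  else (-1, 0)

def get_duplicate_locations_alt (directions : String) : Int :=
  let st := directions.toList.foldl
    (fun (st : (Int × Int) × List (Int × Int)) d =>
      if d ∈ (['N', 'E', 'S', 'W'] : List Char) then
        let pos := (st.1.1 + (pvDelta d).1, st.1.2 + (pvDelta d).2)
        (pos, st.2 ++ [pos])
      else st)
    (((0, 0) : Int × Int), [((0, 0) : Int × Int)])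
  let counts := PySem.Dict.counter st.2
  counts.values.foldl (fun acc v => if 2 ≤ v then acc + 1 else acc) 0

-- ===== PRECONDITION & SPEC =====
def Spec_get_duplicate_locations (directions : String) (out : Int) : Prop := out = get_duplicate_locations_alt directions
instance (directions : String) (out : Int) : Decidable (Spec_get_duplicate_locations directions out) := by unfold Spec_get_duplicate_locations; infer_instance

-- ===== CLAIM (what is proved, stated in full; the proofs are below) =====
def Claim_equal_get_duplicate_locations : Prop := ∀ (directions : String), Dom_get_duplicate_locations directions → Spec_get_duplicate_locations directions (get_duplicate_locations directions)

-- ===== LEMMAS AND PROOFS =====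

-- B's unguarded loop body (the guard is factored into a filter by foldl_ite_eq_foldl_filter)
def pvStepB (st : (Int × Int) × List (Int × Int)) (d : Char) : (Int × Int) × List (Int × Int) :=
  let pos := (st.1.1 + (pvDelta d).1, st.1.2 + (pvDelta d).2)
  (pos, st.2 ++ [pos])

lemma pv_transform_eq (d : Char) (p : Int × Int) :
    pvTransformA d p = (p.1 + (pvDelta d).1, p.2 + (pvDelta d).2) := by
  unfold pvTransformA pvDelta
  split_ifs <;> simp [Prod.ext_iff] <;> omega

lemma pv_count_append_singleton (L : List (Int × Int)) (q x : Int × Int) :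
    (L ++ [q]).count x = L.count x + if q = x then 1 else 0 := by
  simp [List.count_append]
  split_ifs with h <;> simp_all

-- the loop invariant: A's running state mirrors B's trajectory
lemma pv_inv (ms : List Char) (p : Int × Int) (L W : List (Int × Int))
    (hW : W.Nodup) (hmem : ∀ x, x ∈ W ↔ 2 ≤ L.count x) :
    (ms.foldl pvStepA (p, PySem.Set.ofList L, W)).1 = (ms.foldl pvStepB (p, L)).1 ∧
    (ms.foldl pvStepA (p, PySem.Set.ofList L, W)).2.1 =
      PySem.Set.ofList (ms.foldl pvStepB (p, L)).2 ∧
    (ms.foldl pvStepA (p, PySem.Set.ofList L, W)).2.2.Nodup ∧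
    (∀ x, x ∈ (ms.foldl pvStepA (p, PySem.Set.ofList L, W)).2.2 ↔
      2 ≤ (ms.foldl pvStepB (p, L)).2.count x) := by
  induction ms generalizing p L W with
  | nil => exact ⟨rfl, rfl, hW, hmem⟩
  | cons c ms ih =>
    simp only [List.foldl_cons]
    have hq : pvTransformA c p = (p.1 + (pvDelta c).1, p.2 + (pvDelta c).2) :=
      pv_transform_eq c p
    set q : Int × Int := (p.1 + (pvDelta c).1, p.2 + (pvDelta c).2) with hqdef
    have hB : pvStepB (p, L) c = (q, L ++ [q]) := rfl
    rw [hB]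
    by_cases hmemq : q ∈ L
    · have hA : pvStepA (p, PySem.Set.ofList L, W) c = (q, PySem.Set.ofList (L ++ [q]), PySem.Set.add W q) := by
        simp only [pvStepA, hq]
        rw [if_pos (by simpa [PySem.Set.contains_iff, PySem.Set.mem_ofList] using hmemq)]
        rw [PySem.Set.ofList_append_singleton,
          PySem.Set.add_of_mem (s := PySem.Set.ofList L) (x := q)
            (by simpa [PySem.Set.mem_ofList] using hmemq)]
      rw [hA]
      refine ih q (L ++ [q]) (PySem.Set.add W q) (PySem.Set.nodup_add W q hW) ?_
      intro x
      rw [PySem.Set.mem_add, hmem x, pv_count_append_singleton]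
      have hc1 : 1 ≤ L.count q := List.one_le_count_iff.mpr hmemq
      by_cases hx : q = x
      · subst hx; simp; omega
      · have hxq : ¬x = q := fun h => hx h.symm
        simp [hx, hxq]
    · have hA : pvStepA (p, PySem.Set.ofList L, W) c = (q, PySem.Set.ofList (L ++ [q]), W) := by
        simp only [pvStepA, hq]
        rw [if_neg (by simpa [PySem.Set.contains_iff, PySem.Set.mem_ofList] using hmemq)]
        rw [PySem.Set.ofList_append_singleton]
      rw [hA]
      refine ih q (L ++ [q]) W hW ?_
      intro x
      rw [hmem x, pv_count_append_singleton]
      have hc0 : L.count q = 0 := List.count_eq_zero.mpr hmemq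
      by_cases hx : q = x
      · subst hx; simp [hc0]
      · simp [hx]

-- a Nodup list characterised by "count ≥ 2 in T" has the length of the matching part of set(T)
lemma pv_len_eq (W T : List (Int × Int)) (hW : W.Nodup)
    (h : ∀ x, x ∈ W ↔ 2 ≤ T.count x) :
    W.length = ((PySem.Set.ofList T).countP (fun k => decide (2 ≤ T.count k))) := by
  rw [List.countP_eq_length_filter]
  refine List.Perm.length_eq ?_
  rw [List.perm_ext_iff_of_nodup hW ((PySem.Set.nodup_ofList T).filter _)]
  intro x
  rw [h x, List.mem_filter]
  simp only [PySem.Set.mem_ofList, decide_eq_true_eq]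
  constructor
  · rintro hc
    exact ⟨List.one_le_count_iff.mp (by omega), hc⟩
  · rintro ⟨_, hc⟩; exact hc

-- ===== VERDICT (by name: the statement is the Claim_ definition above) =====
theorem get_duplicate_locations_spec : Claim_equal_get_duplicate_locations := by
  intro directions _
  unfold Spec_get_duplicate_locations get_duplicate_locations get_duplicate_locations_alt
  simp only []
  rw [PySem.List.foldl_ite_add_one (p := fun v => (2 : Int) ≤ v)]
  rw [show (fun (st : (Int × Int) × List (Int × Int)) (d : Char) =>
      if d ∈ (['N', 'E', 'S', 'W'] : List Char) then
        ((st.1.1 + (pvDelta d).1, st.1.2 + (pvDelta d).2),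
          st.2 ++ [((st.1.1 + (pvDelta d).1, st.1.2 + (pvDelta d).2))])
      else st) = (fun st d => if d ∈ (['N', 'E', 'S', 'W'] : List Char) then pvStepB st d else st)
    from rfl]
  rw [PySem.List.foldl_ite_eq_foldl_filter]
  obtain ⟨-, -, hnd, hmem⟩ := pv_inv
    (directions.toList.filter (fun dir => decide (dir ∈ (['N', 'E', 'S', 'W'] : List Char))))
    ((0 : Int), (0 : Int)) [((0, 0) : Int × Int)] PySem.Set.empty List.nodup_nil
    (by
      intro x
      constructor
      · intro h; simp [PySem.Set.empty] at h
      · intro h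
        have hle := List.count_le_length (a := x) (l := [((0, 0) : Int × Int)])
        simp at hle; omega)
  set T := ((directions.toList.filter
      (fun dir => decide (dir ∈ (['N', 'E', 'S', 'W'] : List Char)))).foldl pvStepB
      (((0 : Int), (0 : Int)), [((0, 0) : Int × Int)])).2 with hT
  have hvals : (PySem.Dict.counter T).values =
      (PySem.Set.ofList T).map (fun k => ((T.count k : Nat) : Int)) := by
    simp only [PySem.Dict.values, PySem.Dict.items_counter, List.map_map, Function.comp_def]
  rw [hvals, List.countP_map]
  have hpred : ((fun v => decide ((2 : Int) ≤ v)) ∘ fun k => ((T.count k : Nat) : Int)) =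
      (fun k => decide (2 ≤ T.count k)) := by
    funext k
    by_cases h : 2 ≤ T.count k <;> simp [h]
  rw [hpred]
  simp only [PySem.Set.len]
  rw [pv_len_eq _ T hnd hmem]
  ring
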